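-- pv_equiv track=rewrite | github.com/ayazkhan27/cyclic | asymmetrictest2.py | minimal_movement
-- ===== SOURCE A (Python) =====
-- def minimal_movement(start_sequence, target_sequence, digit_positions, sequence_length):
--     """Calculate minimal movement between sequences."""
--     start_positions = digit_positions[start_sequence]
--     target_positions = digit_positions[target_sequence]
--     min_movement_value = None
--     min_movements = []
--
--     for start_pos in start_positions:
--         for target_pos in target_positions:
--             clockwise_movement = (target_pos - start_pos) % sequence_length
--             anticlockwise_movement = (start_pos - target_pos) % sequence_length
--             current_min = min(clockwise_movement, anticlockwise_movement)
--
--             if min_movement_value is None or current_min < min_movement_value: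
--                 min_movement_value = current_min
--                 min_movements = []
--
--             if current_min == min_movement_value:
--                 if clockwise_movement == anticlockwise_movement:
--                     min_movements.extend([clockwise_movement, -anticlockwise_movement])
--                 else:
--                     if clockwise_movement == current_min:
--                         min_movements.append(clockwise_movement)
--                     if anticlockwise_movement == current_min:
--                         min_movements.append(-anticlockwise_movement)
--     return min_movements
-- ===== SOURCE B (Python) =====
-- def minimal_movement(start_sequence, target_sequence, digit_positions, sequence_length):
--     """Calculate minimal movement between sequences (two-pass: global min, then collect)."""
--     pairs = [((t - s) % sequence_length, (s - t) % sequence_length)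
--              for s in digit_positions[start_sequence]
--              for t in digit_positions[target_sequence]]
--     if not pairs:
--         return []
--     m = min(min(cw, acw) for cw, acw in pairs)
--     result = []
--     for cw, acw in pairs:
--         if min(cw, acw) == m:
--             if cw == acw:
--                 result += [cw, -acw]
--             else:
--                 if cw == m:
--                     result.append(cw)
--                 if acw == m:
--                     result.append(-acw)
--     return result
-- ===== Notes on version B (the rewrite author's own statement) =====
-- stated objective: simpler
-- what changed: Replaces A's single stateful scan (running minimum with accumulator resets whenever a smaller movement appears) by a two-phase decomposition: materialise all (clockwise, anticlockwise) pairs once, compute the global minimum with min(), then one stateless filtering pass collects the movements attaining it.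
import Mathlib
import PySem

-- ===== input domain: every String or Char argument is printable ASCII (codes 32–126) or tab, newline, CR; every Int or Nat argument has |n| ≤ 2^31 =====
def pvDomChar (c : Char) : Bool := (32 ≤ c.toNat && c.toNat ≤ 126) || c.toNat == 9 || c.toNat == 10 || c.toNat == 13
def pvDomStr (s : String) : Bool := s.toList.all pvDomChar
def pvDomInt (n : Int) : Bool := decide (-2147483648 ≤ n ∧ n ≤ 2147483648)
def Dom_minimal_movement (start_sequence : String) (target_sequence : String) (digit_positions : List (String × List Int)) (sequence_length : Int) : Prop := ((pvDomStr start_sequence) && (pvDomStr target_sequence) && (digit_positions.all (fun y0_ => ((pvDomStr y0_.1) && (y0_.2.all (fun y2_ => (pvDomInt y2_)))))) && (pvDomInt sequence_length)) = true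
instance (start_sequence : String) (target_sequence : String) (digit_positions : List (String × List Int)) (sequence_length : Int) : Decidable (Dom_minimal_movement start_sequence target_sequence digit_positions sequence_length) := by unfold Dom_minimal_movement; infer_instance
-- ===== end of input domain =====

-- B replaces A's stateful running-minimum-with-resets scan by a two-phase pass: all pairs once, min() once, then a stateless filter; same cost ("simpler" objective).

-- ===== PORT A =====
-- the body of A's inner loop, given clockwise/anticlockwise movements; state = (min_movement_value, min_movements)
def mmInner (st : Option Int × List Int) (clockwise_movement anticlockwise_movement : Int) : Option Int × List Int :=
  let current_min := min clockwise_movement anticlockwise_movement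
  let (mv, acc) :=
    match st with
    | (none, _) => (current_min, ([] : List Int))
    | (some m0, acc0) => if current_min < m0 then (current_min, ([] : List Int)) else (m0, acc0)
  if current_min = mv then
    if clockwise_movement = anticlockwise_movement then
      (some mv, acc ++ [clockwise_movement, -anticlockwise_movement])
    else
      (some mv, (if clockwise_movement = current_min then acc ++ [clockwise_movement] else acc)
                  ++ (if anticlockwise_movement = current_min then [-anticlockwise_movement] else []))
  else (some mv, acc)

def minimal_movement (start_sequence : String) (target_sequence : String) (digit_positions : List (String × List Int)) (sequence_length : Int) : List Int :=
  let start_positions := ((PySem.Dict.mk digit_positions).get? start_sequence).getD []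
  let target_positions := ((PySem.Dict.mk digit_positions).get? target_sequence).getD []
  (start_positions.foldl (fun st start_pos =>
      target_positions.foldl (fun st target_pos =>
        mmInner st (PySem.Int.mod (target_pos - start_pos) sequence_length)
                   (PySem.Int.mod (start_pos - target_pos) sequence_length)) st)
    ((none : Option Int), ([] : List Int))).2

-- ===== PORT B =====
def minimal_movement_alt (start_sequence : String) (target_sequence : String) (digit_positions : List (String × List Int)) (sequence_length : Int) : List Int :=
  let pairs := (((PySem.Dict.mk digit_positions).get? start_sequence).getD []).flatMap (fun s =>
      (((PySem.Dict.mk digit_positions).get? target_sequence).getD []).map (fun t =>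
        (PySem.Int.mod (t - s) sequence_length, PySem.Int.mod (s - t) sequence_length)))
  if pairs = [] then []
  else
    let m := (PySem.List.min? (pairs.map (fun q => min q.1 q.2)) (fun x => x)).getD 0
    pairs.foldl (fun result q =>
      if min q.1 q.2 = m then
        if q.1 = q.2 then result ++ [q.1, -q.2]
        else (if q.1 = m then result ++ [q.1] else result) ++ (if q.2 = m then [-q.2] else [])
      else result) []

-- ===== PRECONDITION & SPEC =====
-- Pre_ excludes exactly the inputs where the Python raises: a missing dict key (KeyError) and
-- sequence_length = 0 with both position lists nonempty (ZeroDivisionError); A never returns there.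
def Pre_minimal_movement (start_sequence : String) (target_sequence : String) (digit_positions : List (String × List Int)) (sequence_length : Int) : Prop :=
  ((PySem.Dict.mk digit_positions).get? start_sequence).isSome = true ∧
  ((PySem.Dict.mk digit_positions).get? target_sequence).isSome = true ∧
  (sequence_length ≠ 0 ∨ ((PySem.Dict.mk digit_positions).get? start_sequence).getD [] = []
    ∨ ((PySem.Dict.mk digit_positions).get? target_sequence).getD [] = [])
instance (start_sequence : String) (target_sequence : String) (digit_positions : List (String × List Int)) (sequence_length : Int) : Decidable (Pre_minimal_movement start_sequence target_sequence digit_positions sequence_length) := by unfold Pre_minimal_movement; infer_instance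

def pvWitness_minimal_movement : String × String × (List (String × List Int)) × Int :=
  ("a", "b", [("a", [0, 2]), ("b", [1])], 4)

def Spec_minimal_movement (start_sequence : String) (target_sequence : String) (digit_positions : List (String × List Int)) (sequence_length : Int) (out : List Int) : Prop := out = minimal_movement_alt start_sequence target_sequence digit_positions sequence_length
instance (start_sequence : String) (target_sequence : String) (digit_positions : List (String × List Int)) (sequence_length : Int) (out : List Int) : Decidable (Spec_minimal_movement start_sequence target_sequence digit_positions sequence_length out) := by unfold Spec_minimal_movement; infer_instance

-- ===== CLAIM (what is proved, stated in full; the proofs are below) =====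
def Claim_equal_minimal_movement : Prop := ∀ (start_sequence : String) (target_sequence : String) (digit_positions : List (String × List Int)) (sequence_length : Int), Dom_minimal_movement start_sequence target_sequence digit_positions sequence_length → Pre_minimal_movement start_sequence target_sequence digit_positions sequence_length → Spec_minimal_movement start_sequence target_sequence digit_positions sequence_length (minimal_movement start_sequence target_sequence digit_positions sequence_length)

-- ===== LEMMAS AND PROOFS =====

-- the movements a pair q contributes when it attains the minimum m
def pvContrib (m : Int) (q : Int × Int) : List Int :=
  if q.1 = q.2 then [q.1, -q.2]
  else (if q.1 = m then [q.1] else []) ++ (if q.2 = m then [-q.2] else [])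
def pvCollect (m : Int) (acc : List Int) (l : List (Int × Int)) : List Int :=
  l.foldl (fun res q => if min q.1 q.2 = m then res ++ pvContrib m q else res) acc
def pvMin (l : List (Int × Int)) (m : Int) : Int := l.foldl (fun b q => min b (min q.1 q.2)) m

lemma pvMin_le (l : List (Int × Int)) (m : Int) : pvMin l m ≤ m := by
  induction l generalizing m with
  | nil => simp [pvMin]
  | cons q t ih =>
      exact le_trans (ih (min m (min q.1 q.2))) (min_le_left _ _)

lemma mmInner_none (acc : List Int) (q : Int × Int) :
    mmInner (none, acc) q.1 q.2 = (some (min q.1 q.2), pvContrib (min q.1 q.2) q) := by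
  simp only [mmInner, pvContrib]
  by_cases hca : q.1 = q.2 <;> simp [hca]

lemma mmInner_some (m : Int) (acc : List Int) (q : Int × Int) :
    mmInner (some m, acc) q.1 q.2 =
      if min q.1 q.2 < m then (some (min q.1 q.2), pvContrib (min q.1 q.2) q)
      else (some m, if min q.1 q.2 = m then acc ++ pvContrib m q else acc) := by
  simp only [mmInner]
  by_cases h : min q.1 q.2 < m
  · rw [if_pos h, if_pos h]
    by_cases hca : q.1 = q.2 <;> simp [pvContrib, hca]
  · rw [if_neg h, if_neg h]
    by_cases he : min q.1 q.2 = m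
    · rw [if_pos he, if_pos he]
      by_cases hca : q.1 = q.2 <;> simp [pvContrib, hca, he]
      split_ifs <;> simp
    · rw [if_neg he, if_neg he]

lemma pvCollect_cons_ne (m : Int) (acc : List Int) (q : Int × Int) (t : List (Int × Int))
    (h : ¬ min q.1 q.2 = m) : pvCollect m acc (q :: t) = pvCollect m acc t := by
  simp [pvCollect, h]

lemma pvCollect_cons_eq (m : Int) (acc : List Int) (q : Int × Int) (t : List (Int × Int))
    (h : min q.1 q.2 = m) : pvCollect m acc (q :: t) = pvCollect m (acc ++ pvContrib m q) t := by
  simp [pvCollect, h]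

lemma loopA_eq (l : List (Int × Int)) (m : Int) (acc : List Int) :
    l.foldl (fun st q => mmInner st q.1 q.2) (some m, acc)
      = (some (pvMin l m),
         if pvMin l m < m then pvCollect (pvMin l m) [] l else pvCollect m acc l) := by
  induction l generalizing m acc with
  | nil => simp [pvMin, pvCollect]
  | cons q t ih =>
      rw [List.foldl_cons, mmInner_some]
      by_cases hlt : min q.1 q.2 < m
      · rw [if_pos hlt, ih]
        have hm : pvMin (q :: t) m = pvMin t (min q.1 q.2) := by
          show pvMin t (min m (min q.1 q.2)) = pvMin t (min q.1 q.2)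
          rw [min_eq_right (le_of_lt hlt)]
        rw [hm, if_pos (lt_of_le_of_lt (pvMin_le t _) hlt)]
        by_cases h2 : pvMin t (min q.1 q.2) < min q.1 q.2
        · rw [if_pos h2, pvCollect_cons_ne _ _ _ _ (by omega)]
        · have heq : pvMin t (min q.1 q.2) = min q.1 q.2 :=
            le_antisymm (pvMin_le _ _) (not_lt.mp h2)
          rw [if_neg h2, heq, pvCollect_cons_eq _ _ _ _ rfl, List.nil_append]
      · rw [if_neg hlt, ih]
        have hm : pvMin (q :: t) m = pvMin t m := by
          show pvMin t (min m (min q.1 q.2)) = pvMin t m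
          rw [min_eq_left (not_lt.mp hlt)]
        rw [hm]
        by_cases h2 : pvMin t m < m
        · rw [if_pos h2, if_pos h2, pvCollect_cons_ne _ _ _ _ (by omega)]
        · rw [if_neg h2, if_neg h2]
          by_cases he : min q.1 q.2 = m
          · rw [if_pos he, pvCollect_cons_eq _ _ _ _ he]
          · rw [if_neg he, pvCollect_cons_ne _ _ _ _ he]

lemma foldl_nested_mm (sp tp : List Int) (L : Int) (init : Option Int × List Int) :
    sp.foldl (fun st s => tp.foldl (fun st t =>
        mmInner st (PySem.Int.mod (t - s) L) (PySem.Int.mod (s - t) L)) st) init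
      = (sp.flatMap (fun s => tp.map (fun t =>
          (PySem.Int.mod (t - s) L, PySem.Int.mod (s - t) L)))).foldl
          (fun st q => mmInner st q.1 q.2) init := by
  induction sp generalizing init with
  | nil => rfl
  | cons s sp ih => simp [List.foldl_append, List.foldl_map, ih]

lemma stepB_eq_collect_step (m : Int) :
    (fun (result : List Int) (q : Int × Int) =>
       if min q.1 q.2 = m then
         if q.1 = q.2 then result ++ [q.1, -q.2]
         else (if q.1 = m then result ++ [q.1] else result) ++ (if q.2 = m then [-q.2] else [])
       else result)
    = fun res q => if min q.1 q.2 = m then res ++ pvContrib m q else res := by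
  funext res q
  simp only [pvContrib]
  split_ifs <;> simp

lemma ports_agree (ss ts : String) (dp : List (String × List Int)) (L : Int) :
    minimal_movement ss ts dp L = minimal_movement_alt ss ts dp L := by
  unfold minimal_movement minimal_movement_alt
  simp only []
  rw [foldl_nested_mm]
  set pairs := (((PySem.Dict.mk dp).get? ss).getD []).flatMap (fun s =>
    ((((PySem.Dict.mk dp).get? ts)).getD []).map (fun t =>
      (PySem.Int.mod (t - s) L, PySem.Int.mod (s - t) L))) with hpairs
  clear_value pairs
  cases pairs with
  | nil => rfl
  | cons q t =>
      rw [if_neg (List.cons_ne_nil q t)]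
      rw [List.foldl_cons, mmInner_none, loopA_eq, stepB_eq_collect_step]
      have hmB : ((PySem.List.min? ((q :: t).map (fun q => min q.1 q.2)) (fun x => x)).getD 0)
          = pvMin t (min q.1 q.2) := by
        rw [List.map_cons, PySem.List.min?_id_cons]
        simp only [Option.getD_some]
        rw [List.foldl_map]
        rfl
      rw [hmB]
      show (if pvMin t (min q.1 q.2) < min q.1 q.2 then pvCollect (pvMin t (min q.1 q.2)) [] t
            else pvCollect (min q.1 q.2) (pvContrib (min q.1 q.2) q) t)
          = pvCollect (pvMin t (min q.1 q.2)) [] (q :: t)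
      by_cases h2 : pvMin t (min q.1 q.2) < min q.1 q.2
      · rw [if_pos h2, pvCollect_cons_ne _ _ _ _ (by omega)]
      · have heq : pvMin t (min q.1 q.2) = min q.1 q.2 :=
          le_antisymm (pvMin_le _ _) (not_lt.mp h2)
        rw [if_neg h2, heq, pvCollect_cons_eq _ _ _ _ rfl, List.nil_append]

-- ===== VERDICT (by name: the statement is the Claim_ definition above) =====
theorem minimal_movement_spec : Claim_equal_minimal_movement := by
  intro ss ts dp L _ _
  unfold Spec_minimal_movement
  exact ports_agree ss ts dp L
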